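-- pv_equiv track=rewrite | github.com/sahmlo/96230-senai_logica | 9. Arrays/7. negativo_positivo.py | positivos_negativos
-- ===== SOURCE A (Python) =====
-- def positivos_negativos(lista):
--     positivos = 0
--     negativos = 0
--     soma_positivo = 0
--     for numero in lista:
--         if numero >= 0:
--             positivos += 1
--             soma_positivo += numero
--         else:
--             negativos += 1
--     return positivos, negativos, soma_positivo
-- ===== SOURCE B (Python) =====
-- def positivos_negativos(lista):
--     s = sorted(lista)
--     negativos = 0
--     for n in s:
--         if n >= 0:
--             break
--         negativos += 1
--     positivos = len(s) - negativos
--     soma_positivo = sum(s[negativos:])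
--     return positivos, negativos, soma_positivo
-- ===== Notes on version B (the rewrite author's own statement) =====
-- stated objective: alternative
-- what changed: Sorts the list first so the negatives form a prefix: counts that prefix until the first non-negative, derives positivos by subtraction and sums the non-negative suffix slice, instead of A's single unsorted pass with three accumulators.
import Mathlib
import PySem

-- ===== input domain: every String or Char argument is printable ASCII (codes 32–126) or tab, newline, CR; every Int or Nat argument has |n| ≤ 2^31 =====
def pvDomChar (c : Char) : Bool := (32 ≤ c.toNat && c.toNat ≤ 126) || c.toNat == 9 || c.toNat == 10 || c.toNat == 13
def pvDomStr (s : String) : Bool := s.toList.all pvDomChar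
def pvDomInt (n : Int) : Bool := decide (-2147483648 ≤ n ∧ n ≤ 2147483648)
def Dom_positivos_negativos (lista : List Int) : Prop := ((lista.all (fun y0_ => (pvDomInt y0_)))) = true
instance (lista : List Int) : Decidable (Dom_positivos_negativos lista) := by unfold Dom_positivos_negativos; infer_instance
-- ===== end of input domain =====

-- B sorts the list so the negatives form a prefix, counts that prefix, derives positivos by
-- subtraction and sums the non-negative suffix slice: a sort-then-scan alternative to A's
-- single unsorted pass with three accumulators (same result, different algorithm, not faster).
-- ===== PORT A =====
def positivos_negativos (lista : List Int) : Int × Int × Int :=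
  lista.foldl
    (fun (st : Int × Int × Int) numero =>
      if numero ≥ 0 then (st.1 + 1, st.2.1, st.2.2 + numero)
      else (st.1, st.2.1 + 1, st.2.2))
    (0, 0, 0)

-- ===== PORT B =====
-- the 'for n in s: if n >= 0: break; negativos += 1' prefix count of Source B
def pvCountNegPrefix : List Int → Nat
  | [] => 0
  | n :: t => if n ≥ 0 then 0 else pvCountNegPrefix t + 1

def positivos_negativos_alt (lista : List Int) : Int × Int × Int :=
  let s := PySem.List.sorted lista (fun x => x) false
  let negativos : Nat := pvCountNegPrefix s
  let positivos : Int := (s.length : Int) - (negativos : Int)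
  let soma_positivo : Int := (PySem.List.slice s (some (negativos : Int)) none).sum
  (positivos, (negativos : Int), soma_positivo)

-- ===== PRECONDITION & SPEC =====
def Spec_positivos_negativos (lista : List Int) (out : Int × Int × Int) : Prop := out = positivos_negativos_alt lista
instance (lista : List Int) (out : Int × Int × Int) : Decidable (Spec_positivos_negativos lista out) := by unfold Spec_positivos_negativos; infer_instance

-- ===== CLAIM (what is proved, stated in full; the proofs are below) =====
def Claim_equal_positivos_negativos : Prop := ∀ (lista : List Int), Dom_positivos_negativos lista → Spec_positivos_negativos lista (positivos_negativos lista)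

-- ===== LEMMAS AND PROOFS =====
lemma pv_foldl_shift (lista : List Int) (p n s : Int) :
    lista.foldl
      (fun (st : Int × Int × Int) numero =>
        if numero ≥ 0 then (st.1 + 1, st.2.1, st.2.2 + numero)
        else (st.1, st.2.1 + 1, st.2.2))
      (p, n, s)
    = ((lista.filter (fun x => decide (0 ≤ x))).length + p,
       ((lista.length : Int) - (lista.filter (fun x => decide (0 ≤ x))).length) + n,
       (lista.filter (fun x => decide (0 ≤ x))).sum + s) := by
  induction lista generalizing p n s with
  | nil => simp
  | cons h t ih =>
    by_cases hh : 0 ≤ h <;>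
      simp [List.foldl_cons, hh, ih, Prod.ext_iff] <;>
      omega

lemma pv_countNeg_eq (s : List Int) :
    pvCountNegPrefix s = (s.takeWhile (fun x => decide (x < 0))).length := by
  induction s with
  | nil => rfl
  | cons h t ih =>
    by_cases hh : 0 ≤ h
    · have h2 : ¬ h < 0 := by omega
      simp [pvCountNegPrefix, hh, h2]
    · have h2 : h < 0 := by omega
      simp [pvCountNegPrefix, hh, h2, ih]

lemma pv_takeWhile_sorted (s : List Int) (hs : s.Pairwise (fun a b => a ≤ b)) :
    s.takeWhile (fun x => decide (x < 0)) = s.filter (fun x => decide (x < 0)) := by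
  induction s with
  | nil => rfl
  | cons h t ih =>
    rcases List.pairwise_cons.mp hs with ⟨hall, ht⟩
    by_cases hh : h < 0
    · simp [hh, ih ht]
    · have hnil : t.filter (fun x => decide (x < 0)) = [] := by
        rw [List.filter_eq_nil_iff]
        intro x hx
        have := hall x hx
        simp
        omega
      simp [hh, hnil]

lemma pv_dropWhile_sorted (s : List Int) (hs : s.Pairwise (fun a b => a ≤ b)) :
    s.dropWhile (fun x => decide (x < 0)) = s.filter (fun x => decide (0 ≤ x)) := by
  induction s with
  | nil => rfl
  | cons h t ih =>
    rcases List.pairwise_cons.mp hs with ⟨hall, ht⟩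
    by_cases hh : h < 0
    · have h2 : ¬ 0 ≤ h := by omega
      simp [hh, h2, ih ht]
    · have h0 : 0 ≤ h := by omega
      have hself : t.filter (fun x => decide (0 ≤ x)) = t := by
        rw [List.filter_eq_self]
        intro x hx
        have := hall x hx
        simp
        omega
      simp [hh, h0, hself]

lemma pv_drop_takeWhile {α : Type} (p : α → Bool) (s : List α) :
    s.drop (s.takeWhile p).length = s.dropWhile p := by
  induction s with
  | nil => rfl
  | cons h t ih =>
    by_cases hp : p h <;> simp [hp, ih]

lemma pv_len_filter_split (l : List Int) :
    (l.filter (fun x => decide (0 ≤ x))).length + (l.filter (fun x => decide (x < 0))).length = l.length := by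
  induction l with
  | nil => rfl
  | cons h t ih =>
    by_cases hh : 0 ≤ h
    · have h2 : ¬ h < 0 := by omega
      simp [hh, h2]
      omega
    · have h2 : h < 0 := by omega
      simp [hh, h2]
      omega

lemma pv_alt_char (lista : List Int) :
    positivos_negativos_alt lista =
      (((lista.filter (fun x => decide (0 ≤ x))).length : Int),
       (lista.length : Int) - ((lista.filter (fun x => decide (0 ≤ x))).length : Int),
       (lista.filter (fun x => decide (0 ≤ x))).sum) := by
  have hperm : (PySem.List.sorted lista (fun x => x) false).Perm lista := by
    simpa using PySem.List.sorted_perm (xs := lista) (key := fun x => x) (rev := false)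
  have hpw : (PySem.List.sorted lista (fun x => x) false).Pairwise (fun a b => a ≤ b) := by
    simpa using PySem.List.sorted_pairwise (xs := lista) (key := fun x => x)
  simp only [positivos_negativos_alt]
  generalize hg : PySem.List.sorted lista (fun x => x) false = s
  rw [hg] at hperm hpw
  rw [pv_countNeg_eq, PySem.List.slice_from_natCast, pv_drop_takeWhile,
      pv_dropWhile_sorted s hpw, pv_takeWhile_sorted s hpw]
  have h1 := pv_len_filter_split s
  have h2 := (hperm.filter (fun x => decide (0 ≤ x))).length_eq
  have h3 := (hperm.filter (fun x => decide (x < 0))).length_eq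
  have h4 := hperm.length_eq
  refine Prod.ext ?_ (Prod.ext ?_ ?_)
  · simp only
    omega
  · simp only
    omega
  · simpa using (hperm.filter (fun x => decide (0 ≤ x))).sum_eq

-- ===== VERDICT (by name: the statement is the Claim_ definition above) =====
theorem positivos_negativos_spec : Claim_equal_positivos_negativos := by
  intro lista _
  unfold Spec_positivos_negativos positivos_negativos
  rw [pv_foldl_shift, pv_alt_char]
  simp
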